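-- pv_equiv track=rewrite | github.com/siddharth1199/aoc_2017 | optum_aoc/2017/day03/a.py | spiral_cord
-- ===== SOURCE A (Python) =====
-- class SpiralClass:
--     """ Class that builds a spiral grid one move at a time """
--     def __init__(self):
--         self.x = 0
--         self.y = 0
--         self.xmin = 0
--         self.xmax = 0
--         self.ymin = 0
--         self.ymax = 0
--         self.direction = 'right'
--         self.index_to_xy_mapping = {1: (0, 0)}
--         self.xy_to_index_mapping = {(0, 0): 1}
--         self.counter = 1
--         self.value_mapping = {1: 1}
--
--     def one_move(self):
--         """ adds one extra element to the spiral """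
--         assert (self.direction in ['left', 'right', 'up', 'down'])
--         self.counter += 1
--
--         new_direction = None
--         if self.direction == 'right':
--             if self.x > self.xmax:
--                 new_direction = 'up'
--                 self.xmax = self.x
--                 self.y += 1
--             else:
--                 self.x += 1
--         elif self.direction == 'up':
--             if self.y > self.ymax:
--                 new_direction = 'left'
--                 self.ymax = self.y
--                 self.x += -1
--             else:
--                 self.y += 1
--         elif self.direction == 'left':
--             if self.x < self.xmin:
--                 new_direction = 'down'
--                 self.xmin = self.x
--                 self.y += -1
--             else:
--                 self.x += -1
--         elif self.direction == 'down':
--             if self.y < self.ymin: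
--                 new_direction = 'right'
--                 self.ymin = self.y
--                 self.x += 1
--             else:
--                 self.y += -1
--
--         if new_direction != None:
--             self.direction = new_direction
--
--         self.index_to_xy_mapping[self.counter] = (self.x, self.y)
--         self.xy_to_index_mapping[(self.x, self.y)] = self.counter
--
--         def value_computer(x, y):
--             """ computes value of position by summing all adjacent squares values """
--             value = 0
--             for x_offset in [-1, 0, 1]:
--                 for y_offset in [-1, 0, 1]:
--                     if x_offset == 0 and y_offset == 0:
--                         continue
--                     elif (x + x_offset, y + y_offset) in self.xy_to_index_mapping:
--                         neighbour_index = self.xy_to_index_mapping[(x + x_offset, y + y_offset)]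
--                         value += self.value_mapping[neighbour_index]
--             return value
--
--         self.value_mapping[self.counter] = value_computer(self.x, self.y)
--
--         return None
--
-- def spiral_cord(index):
--     """ returns the x, y cordinates of an index following spiral """
--     first_larger_value = None
--     spiral_instance = SpiralClass()
--     while spiral_instance.counter < index:
--         spiral_instance.one_move()
--         if first_larger_value == None:  # stops overwriting the new first larger value every time
--             if spiral_instance.value_mapping[(spiral_instance.counter)] > index:
--                 first_larger_value = spiral_instance.value_mapping[(spiral_instance.counter)]
--
--     return spiral_instance.x, spiral_instance.y, first_larger_value
-- ===== SOURCE B (Python) =====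
-- def spiral_cord(index):
--     """ returns the x, y cordinates of an index following spiral """
--     dxs = (1, 0, -1, 0)   # 0=right, 1=up, 2=left, 3=down
--     dys = (0, 1, 0, -1)
--     # --- coordinates: jump over whole straight runs (run lengths 1,1,2,2,3,3,...) ---
--     x = 0
--     y = 0
--     d = 0
--     rem = 1   # steps remaining in the current run
--     run = 1   # current run length
--     m = index - 1   # moves still to perform
--     while m > 0:
--         if m <= rem:
--             x += dxs[d] * m
--             y += dys[d] * m
--             m = 0
--         else:
--             x += dxs[d] * rem
--             y += dys[d] * rem
--             m -= rem
--             d = (d + 1) % 4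
--             if d % 2 == 0:
--                 run += 1
--             rem = run
--     # --- first neighbour-sum value exceeding index: walk the spiral cell by cell,
--     #     keeping values keyed directly by coordinate, and stop as soon as found ---
--     first = None
--     vals = {(0, 0): 1}
--     cx = 0
--     cy = 0
--     d = 0
--     rem = 1
--     run = 1
--     c = 1
--     while c < index and first is None:
--         if rem == 0:
--             d = (d + 1) % 4
--             if d % 2 == 0:
--                 run += 1
--             rem = run
--         cx += dxs[d]
--         cy += dys[d]
--         rem -= 1
--         c += 1
--         v = 0
--         for ox in (-1, 0, 1):
--             for oy in (-1, 0, 1):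
--                 if ox == 0 and oy == 0:
--                     continue
--                 v += vals.get((cx + ox, cy + oy), 0)
--         vals[(cx, cy)] = v
--         if v > index:
--             first = v
--     return x, y, first
-- ===== Notes on version B (the rewrite author's own statement) =====
-- stated objective: faster
-- what changed: B replaces A's cell-by-cell simulation of the whole spiral (direction/bounds state machine plus four dicts) by O(sqrt n) run-length jumps for the coordinates, and a coordinate-keyed neighbour-sum walk that stops as soon as a value exceeds index instead of walking all n cells.
import Mathlib
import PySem

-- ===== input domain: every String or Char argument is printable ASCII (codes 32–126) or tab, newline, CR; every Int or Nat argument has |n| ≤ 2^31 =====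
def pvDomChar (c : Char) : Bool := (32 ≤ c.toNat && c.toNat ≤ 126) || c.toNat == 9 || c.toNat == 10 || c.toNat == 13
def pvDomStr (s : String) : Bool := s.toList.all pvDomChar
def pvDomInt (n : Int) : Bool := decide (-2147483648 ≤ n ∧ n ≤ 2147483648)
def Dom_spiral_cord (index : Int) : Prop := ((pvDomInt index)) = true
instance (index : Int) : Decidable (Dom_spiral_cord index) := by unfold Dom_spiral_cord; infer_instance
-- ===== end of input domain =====

-- B replaces A's O(n) cell-by-cell spiral simulation by O(sqrt n) run-length jumps for the
-- coordinates plus an early-stopping coordinate-keyed neighbour-sum walk (objective: faster).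

-- ===== PORT A =====

/-- The mutable state of Python's `SpiralClass`. -/
structure ASt where
  x : Int
  y : Int
  xmin : Int
  xmax : Int
  ymin : Int
  ymax : Int
  direction : String
  i2xy : PySem.Dict Int (Int × Int)
  xy2i : PySem.Dict (Int × Int) Int
  counter : Int
  val : PySem.Dict Int Int
deriving Repr

/-- `SpiralClass.__init__`. -/
def aInit : ASt :=
  { x := 0, y := 0, xmin := 0, xmax := 0, ymin := 0, ymax := 0, direction := "right",
    i2xy := PySem.Dict.ofList [(1, ((0 : Int), (0 : Int)))],
    xy2i := PySem.Dict.ofList [(((0 : Int), (0 : Int)), 1)],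
    counter := 1,
    val := PySem.Dict.ofList [((1 : Int), (1 : Int))] }

/-- `value_computer(x, y)`: sum the values of all present neighbours.
`self.value_mapping[neighbour_index]` is ported as `getD … 0`; it is exact because every
index stored in `xy_to_index_mapping` has an entry in `value_mapping`, so the KeyError
branch is unreachable. -/
def aValue (xy2i : PySem.Dict (Int × Int) Int) (val : PySem.Dict Int Int) (x y : Int) : Int :=
  [(-1 : Int), 0, 1].foldl (fun acc xo =>
    [(-1 : Int), 0, 1].foldl (fun acc yo =>
      if xo = 0 ∧ yo = 0 then acc
      else if xy2i.contains (x + xo, y + yo) then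
        acc + val.getD (xy2i.getD (x + xo, y + yo) 0) 0
      else acc) acc) 0

/-- `SpiralClass.one_move` (the leading `assert` always succeeds: `direction` is always one
of the four strings). -/
def oneMove (s : ASt) : ASt :=
  let counter := s.counter + 1
  -- the if/elif chain on `self.direction`, including the `new_direction` assignment
  let g : ASt :=
    if s.direction == "right" then
      (if s.x > s.xmax then { s with direction := "up", xmax := s.x, y := s.y + 1, counter := counter }
       else { s with x := s.x + 1, counter := counter })
    else if s.direction == "up" then
      (if s.y > s.ymax then { s with direction := "left", ymax := s.y, x := s.x - 1, counter := counter }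
       else { s with y := s.y + 1, counter := counter })
    else if s.direction == "left" then
      (if s.x < s.xmin then { s with direction := "down", xmin := s.x, y := s.y - 1, counter := counter }
       else { s with x := s.x - 1, counter := counter })
    else if s.direction == "down" then
      (if s.y < s.ymin then { s with direction := "right", ymin := s.y, x := s.x + 1, counter := counter }
       else { s with y := s.y - 1, counter := counter })
    else { s with counter := counter }
  -- dictionary updates (value_computer runs after xy_to_index_mapping got the new cell)
  { g with i2xy := s.i2xy.insert counter (g.x, g.y),
           xy2i := s.xy2i.insert (g.x, g.y) counter,
           val := s.val.insert counter (aValue (s.xy2i.insert (g.x, g.y) counter) s.val g.x g.y) }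

/-- the `while spiral_instance.counter < index` loop; `counter` starts at 1 and grows by
exactly 1 per iteration, so the loop runs exactly `(index - 1).toNat` times. -/
def aLoop (index : Int) : Nat → ASt → Option Int → ASt × Option Int
  | 0, s, fl => (s, fl)
  | n + 1, s, fl =>
      let s' := oneMove s
      let fl' := match fl with
        | none => if s'.val.getD s'.counter 0 > index then some (s'.val.getD s'.counter 0) else none
        | some v => some v
      aLoop index n s' fl'

def spiral_cord (index : Int) : List (Option Int) :=
  let r := aLoop index (index - 1).toNat aInit none
  [some r.1.x, some r.1.y, r.2]

-- ===== PORT B =====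

/-- `dxs[d]` for the tuple `(1, 0, -1, 0)`; only called with `d ∈ {0,1,2,3}`. -/
def dxs (d : Int) : Int := if d = 0 then 1 else if d = 2 then -1 else 0

/-- `dys[d]` for the tuple `(0, 1, 0, -1)`; only called with `d ∈ {0,1,2,3}`. -/
def dys (d : Int) : Int := if d = 1 then 1 else if d = 3 then -1 else 0

/-- B's first `while m > 0` loop: jump over whole straight runs.  Each iteration
strictly decreases `m` (by `rem ≥ 1` or to 0), so `m.toNat` fuel suffices. -/
def bJump : Nat → Int → Int → Int → Int → Int → Int → Int × Int
  | 0, _, x, y, _, _, _ => (x, y)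
  | fuel + 1, m, x, y, d, rem, run =>
      if m > 0 then
        if m ≤ rem then (x + dxs d * m, y + dys d * m)
        else
          let x' := x + dxs d * rem
          let y' := y + dys d * rem
          let m' := m - rem
          let d' := PySem.Int.mod (d + 1) 4
          let run' := if PySem.Int.mod d' 2 = 0 then run + 1 else run
          bJump fuel m' x' y' d' run' run'
      else (x, y)

/-- B's neighbour sum: `vals.get((cx+ox, cy+oy), 0)` over the eight offsets. -/
def bNeighborSum (vals : PySem.Dict (Int × Int) Int) (cx cy : Int) : Int :=
  [(-1 : Int), 0, 1].foldl (fun acc ox =>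
    [(-1 : Int), 0, 1].foldl (fun acc oy =>
      if ox = 0 ∧ oy = 0 then acc
      else acc + vals.getD (cx + ox, cy + oy) 0) acc) 0

/-- B's second loop `while c < index and first is None`; `c` starts at 1 and grows by 1
per iteration, so `(index - 1).toNat` fuel suffices. -/
def bVal (index : Int) : Nat → Int → Int → Int → Int → Int →
    PySem.Dict (Int × Int) Int → Int → Option Int → Option Int
  | 0, _, _, _, _, _, _, _, first => first
  | fuel + 1, cx, cy, d, rem, run, vals, c, first =>
      if c < index ∧ first = none then
        let (d', run', rem') :=
          if rem = 0 then
            let d2 := PySem.Int.mod (d + 1) 4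
            let run2 := if PySem.Int.mod d2 2 = 0 then run + 1 else run
            (d2, run2, run2)
          else (d, run, rem)
        let cx' := cx + dxs d'
        let cy' := cy + dys d'
        let rem2 := rem' - 1
        let c' := c + 1
        let v := bNeighborSum vals cx' cy'
        let vals' := vals.insert (cx', cy') v
        let first' := if v > index then some v else first
        bVal index fuel cx' cy' d' rem2 run' vals' c' first'
      else first

def spiral_cord_alt (index : Int) : List (Option Int) :=
  let p := bJump (index - 1).toNat (index - 1) 0 0 0 1 1
  let first := bVal index (index - 1).toNat 0 0 0 1 1
      (PySem.Dict.ofList [(((0 : Int), (0 : Int)), (1 : Int))]) 1 none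
  [some p.1, some p.2, first]

-- ===== PRECONDITION & SPEC =====
def Spec_spiral_cord (index : Int) (out : List (Option Int)) : Prop := out = spiral_cord_alt index
instance (index : Int) (out : List (Option Int)) : Decidable (Spec_spiral_cord index out) := by unfold Spec_spiral_cord; infer_instance

-- ===== CLAIM (what is proved, stated in full; the proofs are below) =====
def Claim_equal_spiral_cord : Prop := ∀ (index : Int), Dom_spiral_cord index → Spec_spiral_cord index (spiral_cord index)

-- ===== LEMMAS AND PROOFS =====

/-- canonical geometric state: position, direction 0..3, steps remaining in the current
run, current run length (run lengths go 1,1,2,2,3,3,…; the turn is taken lazily, at the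
next move, exactly as A's `direction` string lags one move behind). -/
structure G where
  x : Int
  y : Int
  d : Int
  rem : Int
  run : Int
deriving Repr, DecidableEq

def turnG (g : G) : G :=
  let d' := PySem.Int.mod (g.d + 1) 4
  let run' := if PySem.Int.mod d' 2 = 0 then g.run + 1 else g.run
  { x := g.x, y := g.y, d := d', rem := run', run := run' }

def stepG (g : G) : G :=
  let g' := if g.rem = 0 then turnG g else g
  { x := g'.x + dxs g'.d, y := g'.y + dys g'.d, d := g'.d, rem := g'.rem - 1, run := g'.run }

def g0 : G := ⟨0, 0, 0, 1, 1⟩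

def iterG : Nat → G → G
  | 0, g => g
  | n + 1, g => iterG n (stepG g)

/-- canonical full state: geometry + coordinate-keyed values + counter + first hit. -/
structure F where
  g : G
  vals : PySem.Dict (Int × Int) Int
  c : Int
  first : Option Int

def stepF (index : Int) (t : F) : F :=
  let g' := stepG t.g
  let v := bNeighborSum t.vals g'.x g'.y
  { g := g', vals := t.vals.insert (g'.x, g'.y) v, c := t.c + 1,
    first := match t.first with
             | none => if v > index then some v else none
             | some w => some w }

def f0 : F := ⟨g0, PySem.Dict.ofList [(((0 : Int), (0 : Int)), (1 : Int))], 1, none⟩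

def iterF (index : Int) : Nat → F → F
  | 0, t => t
  | n + 1, t => iterF index n (stepF index t)

/-- geometric coupling invariant between A's state and the canonical machine. -/
def AG (s : ASt) (g : G) : Prop :=
  s.x = g.x ∧ s.y = g.y ∧ 0 ≤ g.rem ∧ 1 ≤ g.run ∧
  ((g.d = 0 ∧ s.direction = "right" ∧ g.x = s.xmax + 1 - g.rem ∧ g.y = s.ymin ∧
      s.ymax = s.ymin + g.run - 1 ∧ s.xmin = s.xmax + 1 - g.run) ∨
   (g.d = 1 ∧ s.direction = "up" ∧ g.y = s.ymax + 1 - g.rem ∧ g.x = s.xmax ∧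
      s.xmin = s.xmax - g.run ∧ s.ymin = s.ymax + 1 - g.run) ∨
   (g.d = 2 ∧ s.direction = "left" ∧ g.x = s.xmin - 1 + g.rem ∧ g.y = s.ymax ∧
      s.ymin = s.ymax - g.run + 1 ∧ s.xmax = s.xmin + g.run - 1) ∨
   (g.d = 3 ∧ s.direction = "down" ∧ g.y = s.ymin - 1 + g.rem ∧ g.x = s.xmin ∧
      s.xmax = s.xmin + g.run ∧ s.ymax = s.ymin + g.run - 1))

/-- full coupling invariant. -/
def RelAF (s : ASt) (fl : Option Int) (t : F) : Prop :=
  AG s t.g ∧ s.counter = t.c ∧ fl = t.first ∧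
  (∀ p : Int × Int, t.vals.get? p = (s.xy2i.get? p).bind (fun i => s.val.get? i)) ∧
  (∀ (p : Int × Int) (i : Int), s.xy2i.get? p = some i → i ≤ t.c)

lemma look_eq (xy2i : PySem.Dict (Int × Int) Int) (val : PySem.Dict Int Int)
    (vals : PySem.Dict (Int × Int) Int)
    (H1 : ∀ p : Int × Int, vals.get? p = (xy2i.get? p).bind (fun i => val.get? i))
    (x y c' qx qy : Int) (hq : ((qx, qy) : Int × Int) ≠ (x, y)) (acc : Int) :
    (if (xy2i.insert (x, y) c').contains (qx, qy) then
       acc + val.getD ((xy2i.insert (x, y) c').getD (qx, qy) 0) 0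
     else acc) = acc + vals.getD (qx, qy) 0 := by
  have hc : (xy2i.insert (x, y) c').get? (qx, qy) = xy2i.get? (qx, qy) :=
    PySem.Dict.get?_insert_of_ne _ _ hq
  have h1 := H1 (qx, qy)
  rw [PySem.Dict.contains_eq_isSome_get?, hc,
    PySem.Dict.getD_eq_get?_getD (xy2i.insert (x, y) c') (qx, qy) 0, hc]
  cases hx : xy2i.get? (qx, qy) with
  | none =>
      rw [hx] at h1
      simp [PySem.Dict.getD_eq_get?_getD, h1]
  | some ni =>
      rw [hx] at h1
      simp [PySem.Dict.getD_eq_get?_getD, h1]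

lemma dict_step (xy2i : PySem.Dict (Int × Int) Int) (val : PySem.Dict Int Int)
    (vals : PySem.Dict (Int × Int) Int) (c x y : Int)
    (H1 : ∀ p : Int × Int, vals.get? p = (xy2i.get? p).bind (fun i => val.get? i))
    (H2 : ∀ (p : Int × Int) (i : Int), xy2i.get? p = some i → i ≤ c) :
    aValue (xy2i.insert (x, y) (c + 1)) val x y = bNeighborSum vals x y ∧
    (∀ p : Int × Int, (vals.insert (x, y) (bNeighborSum vals x y)).get? p
        = ((xy2i.insert (x, y) (c + 1)).get? p).bind
            (fun i => (val.insert (c + 1) (bNeighborSum vals x y)).get? i)) ∧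
    (∀ (p : Int × Int) (i : Int), (xy2i.insert (x, y) (c + 1)).get? p = some i → i ≤ c + 1) := by
  refine ⟨?_, ?_, ?_⟩
  · unfold aValue bNeighborSum
    congr 1
    funext acc xo
    congr 1
    funext acc' yo
    by_cases h : xo = 0 ∧ yo = 0
    · rw [if_pos h, if_pos h]
    · rw [if_neg h, if_neg h]
      refine look_eq xy2i val vals H1 x y (c + 1) (x + xo) (y + yo) ?_ acc'
      simp only [ne_eq, Prod.mk.injEq, not_and]
      intro h1 h2
      exact h ⟨by omega, by omega⟩
  · intro p
    by_cases hp : p = ((x, y) : Int × Int)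
    · subst hp
      rw [PySem.Dict.get?_insert_self, PySem.Dict.get?_insert_self]
      simp [PySem.Dict.get?_insert_self]
    · rw [PySem.Dict.get?_insert_of_ne _ _ hp, PySem.Dict.get?_insert_of_ne _ _ hp]
      cases hx : xy2i.get? p with
      | none => simp [H1 p, hx]
      | some i =>
          have hi : i ≤ c := H2 p i hx
          have : i ≠ c + 1 := by omega
          simp only [Option.bind]
          rw [PySem.Dict.get?_insert_of_ne _ _ this]
          have h1 := H1 p; rw [hx] at h1; simpa using h1
  · intro p i hself
    by_cases hp : p = ((x, y) : Int × Int)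
    · subst hp
      rw [PySem.Dict.get?_insert_self] at hself
      have : c + 1 = i := by injection hself
      omega
    · rw [PySem.Dict.get?_insert_of_ne _ _ hp] at hself
      have := H2 p i hself
      omega

/-- geometric characterisation of one A-move, coupled to the canonical machine. -/
lemma oneMove_char (s : ASt) (g : G) (h : AG s g) :
    AG (oneMove s) (stepG g) ∧
    (oneMove s).counter = s.counter + 1 ∧
    (oneMove s).xy2i = s.xy2i.insert ((stepG g).x, (stepG g).y) (s.counter + 1) ∧
    (oneMove s).val = s.val.insert (s.counter + 1)
      (aValue (s.xy2i.insert ((stepG g).x, (stepG g).y) (s.counter + 1)) s.val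
        (stepG g).x (stepG g).y) := by
  obtain ⟨hx, hy, hrem, hrun, hc⟩ := h
  rcases hc with ⟨hd, hdir, e1, e2, e3, e4⟩ | ⟨hd, hdir, e1, e2, e3, e4⟩ |
    ⟨hd, hdir, e1, e2, e3, e4⟩ | ⟨hd, hdir, e1, e2, e3, e4⟩ <;> by_cases hz : g.rem = 0
  · -- right, turn
    have hcond : s.x > s.xmax := by omega
    have hst : stepG g = ⟨g.x, g.y + 1, 1, g.run - 1, g.run⟩ := by
      simp [stepG, turnG, hz, hd, dxs, dys]
    have hom : oneMove s = 
        { x := s.x, y := s.y + 1, xmin := s.xmin, xmax := s.x, ymin := s.ymin, ymax := s.ymax, direction := "up", i2xy := s.i2xy.insert (s.counter + 1) (s.x, s.y + 1), xy2i := s.xy2i.insert (s.x, s.y + 1) (s.counter + 1), counter := s.counter + 1, val := s.val.insert (s.counter + 1) (aValue (s.xy2i.insert (s.x, s.y + 1) (s.counter + 1)) s.val s.x (s.y + 1)) } := by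
      simp [oneMove, hdir, hcond]
    rw [hom, hst]
    refine ⟨?_, rfl, by rw [hx, hy], by rw [hx, hy]⟩
    unfold AG
    dsimp only
    exact ⟨hx, by omega, by omega, by omega,
      Or.inr (Or.inl ⟨rfl, rfl, by omega, by omega, by omega, by omega⟩)⟩
  · -- right, straight
    have hcond : ¬ s.x > s.xmax := by omega
    have hst : stepG g = ⟨g.x + 1, g.y, 0, g.rem - 1, g.run⟩ := by
      simp [stepG, hz, hd, dxs, dys]
    have hom : oneMove s = 
        { x := s.x + 1, y := s.y, xmin := s.xmin, xmax := s.xmax, ymin := s.ymin, ymax := s.ymax, direction := "right", i2xy := s.i2xy.insert (s.counter + 1) (s.x + 1, s.y), xy2i := s.xy2i.insert (s.x + 1, s.y) (s.counter + 1), counter := s.counter + 1, val := s.val.insert (s.counter + 1) (aValue (s.xy2i.insert (s.x + 1, s.y) (s.counter + 1)) s.val (s.x + 1) s.y) } := by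
      simp [oneMove, hdir, hcond]
    rw [hom, hst]
    refine ⟨?_, rfl, by rw [hx, hy], by rw [hx, hy]⟩
    unfold AG
    dsimp only
    exact ⟨by omega, hy, by omega, by omega,
      Or.inl ⟨rfl, rfl, by omega, by omega, by omega, by omega⟩⟩
  · -- up, turn
    have hcond : s.y > s.ymax := by omega
    have hst : stepG g = ⟨g.x - 1, g.y, 2, g.run, g.run + 1⟩ := by
      simp [stepG, turnG, hz, hd, dxs, dys, G.mk.injEq]
      omega
    have hom : oneMove s = 
        { x := s.x - 1, y := s.y, xmin := s.xmin, xmax := s.xmax, ymin := s.ymin, ymax := s.y, direction := "left", i2xy := s.i2xy.insert (s.counter + 1) (s.x - 1, s.y), xy2i := s.xy2i.insert (s.x - 1, s.y) (s.counter + 1), counter := s.counter + 1, val := s.val.insert (s.counter + 1) (aValue (s.xy2i.insert (s.x - 1, s.y) (s.counter + 1)) s.val (s.x - 1) s.y) } := by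
      simp [oneMove, hdir, hcond]
    rw [hom, hst]
    refine ⟨?_, rfl, by rw [hx, hy], by rw [hx, hy]⟩
    unfold AG
    dsimp only
    exact ⟨by omega, hy, by omega, by omega,
      Or.inr (Or.inr (Or.inl ⟨rfl, rfl, by omega, by omega, by omega, by omega⟩))⟩
  · -- up, straight
    have hcond : ¬ s.y > s.ymax := by omega
    have hst : stepG g = ⟨g.x, g.y + 1, 1, g.rem - 1, g.run⟩ := by
      simp [stepG, hz, hd, dxs, dys]
    have hom : oneMove s = 
        { x := s.x, y := s.y + 1, xmin := s.xmin, xmax := s.xmax, ymin := s.ymin, ymax := s.ymax, direction := "up", i2xy := s.i2xy.insert (s.counter + 1) (s.x, s.y + 1), xy2i := s.xy2i.insert (s.x, s.y + 1) (s.counter + 1), counter := s.counter + 1, val := s.val.insert (s.counter + 1) (aValue (s.xy2i.insert (s.x, s.y + 1) (s.counter + 1)) s.val s.x (s.y + 1)) } := by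
      simp [oneMove, hdir, hcond]
    rw [hom, hst]
    refine ⟨?_, rfl, by rw [hx, hy], by rw [hx, hy]⟩
    unfold AG
    dsimp only
    exact ⟨hx, by omega, by omega, by omega,
      Or.inr (Or.inl ⟨rfl, rfl, by omega, by omega, by omega, by omega⟩)⟩
  · -- left, turn
    have hcond : s.x < s.xmin := by omega
    have hst : stepG g = ⟨g.x, g.y - 1, 3, g.run - 1, g.run⟩ := by
      simp [stepG, turnG, hz, hd, dxs, dys, G.mk.injEq]
      omega
    have hom : oneMove s = 
        { x := s.x, y := s.y - 1, xmin := s.x, xmax := s.xmax, ymin := s.ymin, ymax := s.ymax, direction := "down", i2xy := s.i2xy.insert (s.counter + 1) (s.x, s.y - 1), xy2i := s.xy2i.insert (s.x, s.y - 1) (s.counter + 1), counter := s.counter + 1, val := s.val.insert (s.counter + 1) (aValue (s.xy2i.insert (s.x, s.y - 1) (s.counter + 1)) s.val s.x (s.y - 1)) } := by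
      simp [oneMove, hdir, hcond]
    rw [hom, hst]
    refine ⟨?_, rfl, by rw [hx, hy], by rw [hx, hy]⟩
    unfold AG
    dsimp only
    exact ⟨hx, by omega, by omega, by omega,
      Or.inr (Or.inr (Or.inr ⟨rfl, rfl, by omega, by omega, by omega, by omega⟩))⟩
  · -- left, straight
    have hcond : ¬ s.x < s.xmin := by omega
    have hst : stepG g = ⟨g.x - 1, g.y, 2, g.rem - 1, g.run⟩ := by
      simp [stepG, hz, hd, dxs, dys, G.mk.injEq]
      omega
    have hom : oneMove s = 
        { x := s.x - 1, y := s.y, xmin := s.xmin, xmax := s.xmax, ymin := s.ymin, ymax := s.ymax, direction := "left", i2xy := s.i2xy.insert (s.counter + 1) (s.x - 1, s.y), xy2i := s.xy2i.insert (s.x - 1, s.y) (s.counter + 1), counter := s.counter + 1, val := s.val.insert (s.counter + 1) (aValue (s.xy2i.insert (s.x - 1, s.y) (s.counter + 1)) s.val (s.x - 1) s.y) } := by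
      simp [oneMove, hdir, hcond]
    rw [hom, hst]
    refine ⟨?_, rfl, by rw [hx, hy], by rw [hx, hy]⟩
    unfold AG
    dsimp only
    exact ⟨by omega, hy, by omega, by omega,
      Or.inr (Or.inr (Or.inl ⟨rfl, rfl, by omega, by omega, by omega, by omega⟩))⟩
  · -- down, turn
    have hcond : s.y < s.ymin := by omega
    have hst : stepG g = ⟨g.x + 1, g.y, 0, g.run, g.run + 1⟩ := by
      simp [stepG, turnG, hz, hd, dxs, dys]
    have hom : oneMove s = 
        { x := s.x + 1, y := s.y, xmin := s.xmin, xmax := s.xmax, ymin := s.y, ymax := s.ymax, direction := "right", i2xy := s.i2xy.insert (s.counter + 1) (s.x + 1, s.y), xy2i := s.xy2i.insert (s.x + 1, s.y) (s.counter + 1), counter := s.counter + 1, val := s.val.insert (s.counter + 1) (aValue (s.xy2i.insert (s.x + 1, s.y) (s.counter + 1)) s.val (s.x + 1) s.y) } := by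
      simp [oneMove, hdir, hcond]
    rw [hom, hst]
    refine ⟨?_, rfl, by rw [hx, hy], by rw [hx, hy]⟩
    unfold AG
    dsimp only
    exact ⟨by omega, hy, by omega, by omega,
      Or.inl ⟨rfl, rfl, by omega, by omega, by omega, by omega⟩⟩
  · -- down, straight
    have hcond : ¬ s.y < s.ymin := by omega
    have hst : stepG g = ⟨g.x, g.y - 1, 3, g.rem - 1, g.run⟩ := by
      simp [stepG, hz, hd, dxs, dys, G.mk.injEq]
      omega
    have hom : oneMove s = 
        { x := s.x, y := s.y - 1, xmin := s.xmin, xmax := s.xmax, ymin := s.ymin, ymax := s.ymax, direction := "down", i2xy := s.i2xy.insert (s.counter + 1) (s.x, s.y - 1), xy2i := s.xy2i.insert (s.x, s.y - 1) (s.counter + 1), counter := s.counter + 1, val := s.val.insert (s.counter + 1) (aValue (s.xy2i.insert (s.x, s.y - 1) (s.counter + 1)) s.val s.x (s.y - 1)) } := by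
      simp [oneMove, hdir, hcond]
    rw [hom, hst]
    refine ⟨?_, rfl, by rw [hx, hy], by rw [hx, hy]⟩
    unfold AG
    dsimp only
    exact ⟨hx, by omega, by omega, by omega,
      Or.inr (Or.inr (Or.inr ⟨rfl, rfl, by omega, by omega, by omega, by omega⟩))⟩

/-- one step of A's loop matches one step of the canonical machine. -/
lemma step_rel (index : Int) (s : ASt) (fl : Option Int) (t : F) (h : RelAF s fl t) :
    RelAF (oneMove s)
      (match fl with
       | none => if (oneMove s).val.getD (oneMove s).counter 0 > index
                 then some ((oneMove s).val.getD (oneMove s).counter 0) else none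
       | some v => some v)
      (stepF index t) := by
  obtain ⟨hAG, hcnt, hfl, H1, H2⟩ := h
  obtain ⟨hAG', hcc, hcxy2i, hcval⟩ := oneMove_char s t.g hAG
  rw [hcnt] at hcc hcxy2i hcval
  have hds := dict_step s.xy2i s.val t.vals t.c (stepG t.g).x (stepG t.g).y H1 H2
  have hveq : aValue (s.xy2i.insert ((stepG t.g).x, (stepG t.g).y) (t.c + 1)) s.val
      (stepG t.g).x (stepG t.g).y = bNeighborSum t.vals (stepG t.g).x (stepG t.g).y := hds.1
  rw [hveq] at hcval
  have hgF : (stepF index t).g = stepG t.g := rfl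
  refine ⟨by rw [hgF]; exact hAG', by simp [stepF, hcc], ?_, ?_, ?_⟩
  · -- first component
    cases fl with
    | some w =>
        show some w = (stepF index t).first
        simp [stepF, ← hfl]
    | none =>
        have hg : (oneMove s).val.getD (oneMove s).counter 0
            = bNeighborSum t.vals (stepG t.g).x (stepG t.g).y := by
          rw [hcval, hcc, PySem.Dict.getD_insert_self]
        show (if (oneMove s).val.getD (oneMove s).counter 0 > index
              then some ((oneMove s).val.getD (oneMove s).counter 0) else none)
            = (stepF index t).first
        rw [hg]
        simp [stepF, ← hfl]
  · intro p
    show (stepF index t).vals.get? p = _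
    rw [hcxy2i, hcval]
    simp only [stepF]
    exact hds.2.1 p
  · intro p i hp
    rw [hcxy2i] at hp
    have := hds.2.2 p i hp
    simpa [stepF] using this

lemma aLoop_rel (index : Int) : ∀ (n : Nat) (s : ASt) (fl : Option Int) (t : F),
    RelAF s fl t → RelAF (aLoop index n s fl).1 (aLoop index n s fl).2 (iterF index n t) := by
  intro n
  induction n with
  | zero => intro s fl t h; simpa [aLoop, iterF] using h
  | succ n ih =>
      intro s fl t h
      have h' := step_rel index s fl t h
      cases fl with
      | none => simpa [aLoop, iterF] using ih _ _ _ h'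
      | some v => simpa [aLoop, iterF] using ih _ _ _ h'

lemma rel_init : RelAF aInit none f0 := by
  have e : (PySem.Dict.ofList [(((0 : Int), (0 : Int)), (1 : Int))])
      = PySem.Dict.empty.insert ((0 : Int), (0 : Int)) 1 := by decide
  have ev : (PySem.Dict.ofList [((1 : Int), (1 : Int))])
      = PySem.Dict.empty.insert (1 : Int) 1 := by decide
  refine ⟨by norm_num [AG, aInit, g0, f0], rfl, rfl, ?_, ?_⟩
  · intro p
    show (PySem.Dict.ofList [(((0 : Int), (0 : Int)), (1 : Int))]).get? p
        = ((PySem.Dict.ofList [(((0 : Int), (0 : Int)), (1 : Int))]).get? p).bind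
            (fun i => (PySem.Dict.ofList [((1 : Int), (1 : Int))]).get? i)
    rw [e, ev]
    by_cases hp : p = (((0 : Int), (0 : Int)) : Int × Int)
    · subst hp
      rw [PySem.Dict.get?_insert_self]
      simp [PySem.Dict.get?_insert_self]
    · rw [PySem.Dict.get?_insert_of_ne _ _ hp]
      simp [PySem.Dict.get?_empty]
  · intro p i h
    show i ≤ (1 : Int)
    have h' : (PySem.Dict.empty.insert (((0 : Int), (0 : Int)) : Int × Int) (1 : Int)).get? p
        = some i := by rw [← e]; exact h
    by_cases hp : p = (((0 : Int), (0 : Int)) : Int × Int)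
    · subst hp
      rw [PySem.Dict.get?_insert_self] at h'
      have := Option.some.inj h'
      omega
    · rw [PySem.Dict.get?_insert_of_ne _ _ hp] at h'
      simp [PySem.Dict.get?_empty] at h'

lemma iterG_straight : ∀ (n : Nat) (g : G), (n : Int) ≤ g.rem →
    iterG n g = ⟨g.x + dxs g.d * n, g.y + dys g.d * n, g.d, g.rem - n, g.run⟩ := by
  intro n
  induction n with
  | zero => intro g h; cases g; simp [iterG]
  | succ n ih =>
      intro g h
      have hz : ¬ g.rem = 0 := by
        have : ((n : Int) + 1) ≤ g.rem := by exact_mod_cast h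
        omega
      show iterG n (stepG g) = _
      have hst : stepG g = ⟨g.x + dxs g.d, g.y + dys g.d, g.d, g.rem - 1, g.run⟩ := by
        simp [stepG, hz]
      rw [hst, ih ⟨g.x + dxs g.d, g.y + dys g.d, g.d, g.rem - 1, g.run⟩ (by
        simp only []
        have : ((n : Int) + 1) ≤ g.rem := by exact_mod_cast h
        omega)]
      rw [G.mk.injEq]
      refine ⟨by push_cast; ring, by push_cast; ring, rfl, by push_cast; ring, rfl⟩

lemma iterG_add : ∀ (a b : Nat) (g : G), iterG (a + b) g = iterG b (iterG a g) := by
  intro a b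
  induction a with
  | zero => intro g; simp [iterG]
  | succ a ih =>
      intro g
      have e : a + 1 + b = (a + b) + 1 := by omega
      rw [e]
      show iterG (a + b) (stepG g) = iterG b (iterG a (stepG g))
      exact ih (stepG g)

lemma iterG_turn_xy (n : Nat) (g : G) (h0 : g.rem = 0) (h1 : 1 ≤ g.run) :
    ((iterG n (turnG g)).x, (iterG n (turnG g)).y) = ((iterG n g).x, (iterG n g).y) := by
  cases n with
  | zero => rfl
  | succ n =>
      have hrz : ¬ (turnG g).rem = 0 := by
        unfold turnG
        dsimp only
        split_ifs <;> omega
      have e : stepG (turnG g) = stepG g := by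
        simp [stepG, hrz, h0]
      show ((iterG n (stepG (turnG g))).x, (iterG n (stepG (turnG g))).y)
          = ((iterG n (stepG g)).x, (iterG n (stepG g)).y)
      rw [e]

lemma bJump_eq : ∀ (fuel : Nat) (m x y d rem run : Int), m.toNat ≤ fuel → 1 ≤ rem → 1 ≤ run →
    bJump fuel m x y d rem run
      = ((iterG m.toNat ⟨x, y, d, rem, run⟩).x, (iterG m.toNat ⟨x, y, d, rem, run⟩).y) := by
  intro fuel
  induction fuel with
  | zero =>
      intro m x y d rem run hf h1 h2
      have hm0 : m.toNat = 0 := by omega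
      rw [hm0]
      simp [bJump, iterG]
  | succ fuel ih =>
      intro m x y d rem run hf h1 h2
      by_cases hm : m > 0
      · by_cases hmr : m ≤ rem
        · have hst := iterG_straight m.toNat ⟨x, y, d, rem, run⟩
            (by simp only []; omega)
          rw [hst]
          have hmn : ((m.toNat : Int)) = m := Int.toNat_of_nonneg (by omega)
          simp [bJump, hm, hmr, hmn]
        · have hsplit : m.toNat = rem.toNat + (m - rem).toNat := by omega
          have hrunpos : 1 ≤ (if PySem.Int.mod (PySem.Int.mod (d + 1) 4) 2 = 0
              then run + 1 else run) := by split_ifs <;> omega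
          have ihr := ih (m - rem) (x + dxs d * rem) (y + dys d * rem)
            (PySem.Int.mod (d + 1) 4)
            (if PySem.Int.mod (PySem.Int.mod (d + 1) 4) 2 = 0 then run + 1 else run)
            (if PySem.Int.mod (PySem.Int.mod (d + 1) 4) 2 = 0 then run + 1 else run)
            (by omega) hrunpos hrunpos
          have hrt : iterG rem.toNat ⟨x, y, d, rem, run⟩
              = ⟨x + dxs d * rem, y + dys d * rem, d, 0, run⟩ := by
            rw [iterG_straight rem.toNat ⟨x, y, d, rem, run⟩ (by simp only []; omega)]
            have : ((rem.toNat : Int)) = rem := Int.toNat_of_nonneg (by omega)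
            simp [this]
          have hturn : turnG ⟨x + dxs d * rem, y + dys d * rem, d, 0, run⟩
              = ⟨x + dxs d * rem, y + dys d * rem, PySem.Int.mod (d + 1) 4,
                 if PySem.Int.mod (PySem.Int.mod (d + 1) 4) 2 = 0 then run + 1 else run,
                 if PySem.Int.mod (PySem.Int.mod (d + 1) 4) 2 = 0 then run + 1 else run⟩ := by
            simp [turnG]
          have hxy := iterG_turn_xy (m - rem).toNat
            ⟨x + dxs d * rem, y + dys d * rem, d, 0, run⟩ rfl h2
          rw [hturn] at hxy
          have hL : bJump (fuel + 1) m x y d rem run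
              = bJump fuel (m - rem) (x + dxs d * rem) (y + dys d * rem)
                  (PySem.Int.mod (d + 1) 4)
                  (if PySem.Int.mod (PySem.Int.mod (d + 1) 4) 2 = 0 then run + 1 else run)
                  (if PySem.Int.mod (PySem.Int.mod (d + 1) 4) 2 = 0 then run + 1 else run) := by
            have hmle : ¬ m ≤ rem := by omega
            simp [bJump, hm, hmle]
          rw [hL, ihr, hxy, hsplit, iterG_add, hrt]
      · have hm0 : m.toNat = 0 := by omega
        rw [hm0]
        simp [bJump, hm, iterG]

lemma iterF_first_some (index : Int) : ∀ (n : Nat) (t : F) (w : Int),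
    t.first = some w → (iterF index n t).first = some w := by
  intro n
  induction n with
  | zero => intro t w h; simpa [iterF] using h
  | succ n ih =>
      intro t w h
      show (iterF index n (stepF index t)).first = some w
      exact ih _ _ (by simp [stepF, h])

lemma iterF_g (index : Int) : ∀ (n : Nat) (t : F), (iterF index n t).g = iterG n t.g := by
  intro n
  induction n with
  | zero => intro t; rfl
  | succ n ih =>
      intro t
      show (iterF index n (stepF index t)).g = iterG n (stepG t.g)
      rw [ih (stepF index t)]
      rfl

lemma bVal_eq (index : Int) : ∀ (f : Nat) (t : F), ((f : Int) ≤ index - t.c ∨ f = 0) →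
    bVal index f t.g.x t.g.y t.g.d t.g.rem t.g.run t.vals t.c t.first
      = (iterF index f t).first := by
  intro f
  induction f with
  | zero => intro t h; rfl
  | succ f ih =>
      intro t h
      have hc : t.c < index := by
        rcases h with h | h
        · have : ((f : Int) + 1) ≤ index - t.c := by exact_mod_cast h
          omega
        · exact absurd h (Nat.succ_ne_zero f)
      show _ = (iterF index f (stepF index t)).first
      cases hfst : t.first with
      | some w =>
          have hR : (iterF index f (stepF index t)).first = some w :=
            iterF_first_some index f (stepF index t) w (by simp [stepF, hfst])
          rw [hR]
          simp [bVal]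
      | none =>
          have hstep : bVal index (f + 1) t.g.x t.g.y t.g.d t.g.rem t.g.run t.vals t.c none
              = bVal index f (stepF index t).g.x (stepF index t).g.y (stepF index t).g.d
                  (stepF index t).g.rem (stepF index t).g.run (stepF index t).vals
                  (stepF index t).c (stepF index t).first := by
            by_cases hz : t.g.rem = 0 <;>
              simp [bVal, stepF, stepG, turnG, hc, hz, hfst]
          rw [hstep]
          refine ih (stepF index t) (Or.inl ?_)
          have hcc : (stepF index t).c = t.c + 1 := rfl
          rw [hcc]
          rcases h with h | h
          · have : ((f : Int) + 1) ≤ index - t.c := by exact_mod_cast h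
            omega
          · exact absurd h (Nat.succ_ne_zero f)

-- ===== VERDICT (by name: the statement is the Claim_ definition above) =====
theorem spiral_cord_spec : Claim_equal_spiral_cord := by
  intro index _
  unfold Spec_spiral_cord
  have hA := aLoop_rel index (index - 1).toNat aInit none f0 rel_init
  obtain ⟨hAG, hc, hfl, _, _⟩ := hA
  obtain ⟨hx, hy, _⟩ := hAG
  have hJ : bJump (index - 1).toNat (index - 1) 0 0 0 1 1
      = ((iterG (index - 1).toNat g0).x, (iterG (index - 1).toNat g0).y) :=
    bJump_eq _ _ 0 0 0 1 1 le_rfl (by norm_num) (by norm_num)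
  have hV : bVal index (index - 1).toNat 0 0 0 1 1
        (PySem.Dict.ofList [(((0 : Int), (0 : Int)), (1 : Int))]) 1 none
      = (iterF index (index - 1).toNat f0).first := by
    have := bVal_eq index (index - 1).toNat f0 (by
      by_cases h : 1 ≤ index
      · left; simp only [f0]; omega
      · right; omega)
    simpa [f0, g0] using this
  have hG := iterF_g index (index - 1).toNat f0
  simp only [spiral_cord, spiral_cord_alt, hJ, hV]
  rw [hx, hy, hfl, hG]
  simp [f0]
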